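-- pv_equiv track=rewrite | github.com/jarmolkowicz/modrn-mind-knowledge-base | tooling/scripts/backfill.py | disambiguate
-- ===== SOURCE A (Python) =====
-- def disambiguate(candidates: list[str], title_tokens: list[str]) -> str | None:
--     """If multiple candidate slugs match surname+year, pick the one whose
--     slug shares the most tokens with the filename's title. Return the best
--     match if it's a unique winner, else None (ambiguous)."""
--     if not candidates:
--         return None
--     if len(candidates) == 1:
--         return candidates[0]
--     if not title_tokens:
--         return None
--     scores: dict[str, int] = {}
--     for slug in candidates:
--         slug_tokens = set(slug.split("-"))
--         # Don't count year/surname tokens — those are already-matched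
--         score = sum(1 for t in title_tokens if t in slug_tokens)
--         # Also count partial token matches (e.g. 'rebound' in slug 'ai-rebound')
--         for t in title_tokens:
--             for st in slug_tokens:
--                 if t != st and (t in st or st in t) and min(len(t), len(st)) >= 5:
--                     score += 1
--         scores[slug] = score
--     best_score = max(scores.values())
--     if best_score == 0:
--         return None
--     winners = [s for s, sc in scores.items() if sc == best_score]
--     return winners[0] if len(winners) == 1 else None
-- ===== SOURCE B (Python) =====
-- def disambiguate(candidates: list[str], title_tokens: list[str]) -> str | None:
--     """Sort-then-scan: rank the distinct slugs by score descending and decide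
--     by looking at the top two, instead of building a scores dict and
--     re-scanning it with max() and a winners list."""
--     if not candidates:
--         return None
--     if len(candidates) == 1:
--         return candidates[0]
--     if not title_tokens:
--         return None
--
--     def score(slug: str) -> int:
--         toks = set(slug.split("-"))
--         return sum(1 for t in title_tokens for st in toks
--                    if t == st or ((t in st or st in t) and min(len(t), len(st)) >= 5))
--
--     slugs = list(dict.fromkeys(candidates))
--     ranked = sorted(slugs, key=score, reverse=True)
--     top = ranked[0]
--     if score(top) == 0:
--         return None
--     if len(ranked) > 1 and score(ranked[1]) == score(top):
--         return None
--     return top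
-- ===== Notes on version B (the rewrite author's own statement) =====
-- stated objective: alternative
-- what changed: Replaces the scores dict plus max()/winners-list re-scan with sort-then-scan: score each distinct slug with one unified comprehension (exact and partial matches merged into a single predicate), sort the slugs by score descending, and decide by inspecting only the top two ranked slugs.
import Mathlib
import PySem

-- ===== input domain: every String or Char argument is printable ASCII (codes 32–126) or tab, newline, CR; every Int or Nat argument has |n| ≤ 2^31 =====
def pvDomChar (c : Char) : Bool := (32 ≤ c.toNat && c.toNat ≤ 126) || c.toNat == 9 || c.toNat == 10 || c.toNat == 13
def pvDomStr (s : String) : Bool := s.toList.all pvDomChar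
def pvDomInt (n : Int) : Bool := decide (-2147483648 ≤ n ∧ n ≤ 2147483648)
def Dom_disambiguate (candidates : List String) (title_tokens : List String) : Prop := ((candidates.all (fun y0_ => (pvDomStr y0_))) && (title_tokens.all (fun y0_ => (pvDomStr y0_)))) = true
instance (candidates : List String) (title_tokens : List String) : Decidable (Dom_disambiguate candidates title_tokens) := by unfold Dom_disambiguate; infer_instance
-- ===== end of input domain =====

-- B replaces the scores dict plus the max()/winners-list re-scans with sort-then-scan: one unified
-- comprehension scores each distinct slug, the slugs are sorted by score descending, and the answer
-- is read off the top two ranked slugs (objective: alternative).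

-- ===== PORT A =====
def disambiguate (candidates : List String) (title_tokens : List String) : Option String :=
  if candidates = [] then none
  else if candidates.length = 1 then candidates[0]?
  else if title_tokens = [] then none
  else
    let scores : PySem.Dict String Int :=
      candidates.foldl (fun d slug =>
        let slug_tokens : PySem.Set String := PySem.Set.ofList ((PySem.Str.split? slug "-").getD [])
        let score : Int := title_tokens.foldl (fun acc t => if slug_tokens.contains t then acc + 1 else acc) 0
        let score : Int := title_tokens.foldl (fun sc t =>
          slug_tokens.foldl (fun sc st =>
            if t ≠ st ∧ (PySem.Str.isIn t st ∨ PySem.Str.isIn st t) ∧ 5 ≤ min (PySem.Str.len t) (PySem.Str.len st)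
            then sc + 1 else sc) sc) score
        d.insert slug score) PySem.Dict.empty
    match PySem.List.max? scores.values (fun v => v) with
    | none => none  -- unreachable totality guard: candidates ≠ [] means scores.values ≠ []
    | some best_score =>
      if best_score = 0 then none
      else
        let winners := (scores.items.filter (fun p => p.2 == best_score)).map (fun p => p.1)
        if winners.length = 1 then winners[0]? else none

-- ===== PORT B =====
def disambiguate_alt (candidates : List String) (title_tokens : List String) : Option String :=
  if candidates = [] then none
  else if candidates.length = 1 then candidates[0]?
  else if title_tokens = [] then none
  else
    let score : String → Int := fun slug =>
      let toks : PySem.Set String := PySem.Set.ofList ((PySem.Str.split? slug "-").getD [])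
      title_tokens.foldl (fun sc t =>
        toks.foldl (fun sc st =>
          if t = st ∨ (PySem.Str.isIn t st ∨ PySem.Str.isIn st t) ∧ 5 ≤ min (PySem.Str.len t) (PySem.Str.len st)
          then sc + 1 else sc) sc) 0
    let slugs := PySem.List.dedup candidates
    let ranked := PySem.List.sorted slugs score true
    match ranked with
    | [] => none  -- unreachable totality guard: candidates ≠ [] means slugs ≠ []
    | top :: rest =>
      if score top = 0 then none
      else
        match rest with
        | [] => some top
        | second :: _ => if score second = score top then none else some top

-- ===== PRECONDITION & SPEC =====
def Spec_disambiguate (candidates : List String) (title_tokens : List String) (out : Option String) : Prop := out = disambiguate_alt candidates title_tokens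
instance (candidates : List String) (title_tokens : List String) (out : Option String) : Decidable (Spec_disambiguate candidates title_tokens out) := by unfold Spec_disambiguate; infer_instance

-- ===== CLAIM (what is proved, stated in full; the proofs are below) =====
def Claim_equal_disambiguate : Prop := ∀ (candidates : List String) (title_tokens : List String), Dom_disambiguate candidates title_tokens → Spec_disambiguate candidates title_tokens (disambiguate candidates title_tokens)

-- ===== LEMMAS AND PROOFS =====

-- B's per-slug score, as a named function (definitionally the score computed inline in port B).
def pvScore (title_tokens : List String) (slug : String) : Int :=
  title_tokens.foldl (fun sc t =>
    (PySem.Set.ofList ((PySem.Str.split? slug "-").getD [])).foldl (fun sc st =>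
      if t = st ∨ (PySem.Str.isIn t st ∨ PySem.Str.isIn st t) ∧ 5 ≤ min (PySem.Str.len t) (PySem.Str.len st)
      then sc + 1 else sc) sc) 0

theorem pv_countP_split (t : String) (Q : String → Prop) [DecidablePred Q] (S : List String) :
    S.countP (fun st => decide (t = st ∨ Q st)) =
      S.countP (fun st => decide (t = st)) + S.countP (fun st => decide (t ≠ st ∧ Q st)) := by
  induction S with
  | nil => simp
  | cons c S ih =>
    rw [List.countP_cons, List.countP_cons, List.countP_cons, ih]
    by_cases h : t = c <;> by_cases hq : Q c <;> simp [h, hq] <;> omega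

theorem pv_countP_eq_nodup (t : String) (S : List String) (hS : S.Nodup) :
    S.countP (fun st => decide (t = st)) = if t ∈ S then 1 else 0 := by
  induction S with
  | nil => simp
  | cons c S ih =>
    rcases List.nodup_cons.mp hS with ⟨hc, hS'⟩
    by_cases h : t = c
    · subst h
      rw [List.countP_cons]
      have h0 : S.countP (fun st => decide (t = st)) = 0 :=
        List.countP_eq_zero.mpr (by intro a ha; simp; rintro rfl; exact hc ha)
      simp [h0]
    · rw [List.countP_cons, ih hS']
      by_cases hm : t ∈ S <;> simp [h, hm]

-- A's score (membership count, then partial-match double loop) equals B's unified double loop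
theorem pv_score_eq (tt : List String) (S : List String) (hS : S.Nodup) :
    tt.foldl (fun sc t =>
        S.foldl (fun sc st =>
          if t ≠ st ∧ (PySem.Str.isIn t st ∨ PySem.Str.isIn st t) ∧ 5 ≤ min (PySem.Str.len t) (PySem.Str.len st)
          then sc + 1 else sc) sc)
      (tt.foldl (fun acc t => if S.contains t then acc + 1 else acc) (0 : Int)) =
    tt.foldl (fun sc t =>
        S.foldl (fun sc st =>
          if t = st ∨ (PySem.Str.isIn t st ∨ PySem.Str.isIn st t) ∧ 5 ≤ min (PySem.Str.len t) (PySem.Str.len st)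
          then sc + 1 else sc) sc) (0 : Int) := by
  have key : ∀ t : String,
      ((S.countP (fun st => decide (t = st ∨ (PySem.Str.isIn t st ∨ PySem.Str.isIn st t) ∧ 5 ≤ min (PySem.Str.len t) (PySem.Str.len st))) : Nat) : Int)
        = (if S.contains t = true then (1 : Int) else 0)
          + ((S.countP (fun st => decide (t ≠ st ∧ (PySem.Str.isIn t st ∨ PySem.Str.isIn st t) ∧ 5 ≤ min (PySem.Str.len t) (PySem.Str.len st))) : Nat) : Int) := by
    intro t
    rw [pv_countP_split t (fun st => (PySem.Str.isIn t st ∨ PySem.Str.isIn st t) ∧ 5 ≤ min (PySem.Str.len t) (PySem.Str.len st)) S,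
      pv_countP_eq_nodup t S hS]
    by_cases hm : t ∈ S <;> simp [hm]
  simp only [PySem.List.foldl_ite_add_one, PySem.List.foldl_add]
  rw [List.map_congr_left (fun t _ => key t), PySem.List.sum_map_add_int,
    PySem.List.sum_map_ite_one_zero]
  simp only [Bool.decide_eq_true]
  ring

-- the dict-building loop over candidates, with a value depending only on the key, is a map over the dedup
theorem pv_dict_fold (g : String → Int)
    (body : PySem.Dict String Int → String → PySem.Dict String Int)
    (hbody : ∀ d s, body d s = d.insert s (g s)) :
    ∀ (cs pref : List String),
      cs.foldl body (PySem.Dict.mk ((PySem.List.dedup pref).map (fun s => (s, g s)))) =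
        PySem.Dict.mk ((PySem.List.dedup (pref ++ cs)).map (fun s => (s, g s))) := by
  intro cs
  induction cs with
  | nil => intro pref; simp
  | cons c cs ih =>
    intro pref
    rw [List.foldl_cons, hbody]
    have hded : PySem.List.dedup (pref ++ [c]) =
        if c ∈ pref then PySem.List.dedup pref else PySem.List.dedup pref ++ [c] := by
      simp only [PySem.List.dedup_eq_ofList]
      have hof : PySem.Set.ofList (pref ++ [c]) = PySem.Set.add (PySem.Set.ofList pref) c := by
        show List.foldl PySem.Set.add [] (pref ++ [c]) = _
        rw [List.foldl_append]
        rfl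
      rw [hof]
      by_cases h : c ∈ pref
      · rw [if_pos h]
        have hct : (PySem.Set.ofList pref).contains c = true :=
          (PySem.Set.contains_iff _ _).mpr ((PySem.Set.mem_ofList _ _).mpr h)
        simp [PySem.Set.add, h]
      · rw [if_neg h]
        have hct : ¬ (PySem.Set.ofList pref).contains c = true := by
          rw [PySem.Set.contains_iff, PySem.Set.mem_ofList]; exact h
        simp [PySem.Set.add, h]
    have hins : (PySem.Dict.mk ((PySem.List.dedup pref).map (fun s => (s, g s)))).insert c (g c)
        = PySem.Dict.mk ((PySem.List.dedup (pref ++ [c])).map (fun s => (s, g s))) := by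
      by_cases h : c ∈ pref
      · have hc' : c ∈ PySem.List.dedup pref := (PySem.List.mem_dedup _ _).mpr h
        have hcont : (PySem.Dict.mk ((PySem.List.dedup pref).map (fun s => (s, g s)))).contains c = true := by
          rw [PySem.Dict.contains_mk, List.any_eq_true]
          exact ⟨(c, g c), List.mem_map_of_mem hc', by simp⟩
        apply PySem.Dict.ext
        rw [PySem.Dict.items_insert_of_contains _ _ hcont]
        show List.map _ ((PySem.List.dedup pref).map (fun s => (s, g s))) = _
        rw [hded, if_pos h, List.map_map]
        apply List.map_congr_left
        intro s _
        by_cases hsc : s = c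
        · subst hsc; simp
        · simp [Function.comp, hsc]
      · have hc' : c ∉ PySem.List.dedup pref := fun hx => h ((PySem.List.mem_dedup _ _).mp hx)
        have hcont : (PySem.Dict.mk ((PySem.List.dedup pref).map (fun s => (s, g s)))).contains c = false := by
          rw [PySem.Dict.contains_mk, List.any_eq_false]
          intro p hp
          obtain ⟨s, hs, rfl⟩ := List.mem_map.mp hp
          simp only [beq_iff_eq]
          intro hEq
          exact hc' (hEq ▸ hs)
        apply PySem.Dict.ext
        rw [PySem.Dict.items_insert_of_not_contains _ _ hcont]
        show ((PySem.List.dedup pref).map (fun s => (s, g s))) ++ [(c, g c)] = _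
        rw [hded, if_neg h, List.map_append]
        simp
    rw [hins, ih (pref ++ [c])]
    simp

theorem pv_dict_fold' (g : String → Int)
    (body : PySem.Dict String Int → String → PySem.Dict String Int)
    (hbody : ∀ d s, body d s = d.insert s (g s)) (cs : List String) :
    cs.foldl body PySem.Dict.empty =
      PySem.Dict.mk ((PySem.List.dedup cs).map (fun s => (s, g s))) :=
  pv_dict_fold g body hbody cs []

theorem pv_foldl_le {α : Type} (f : Int → α → Int) (h : ∀ a x, a ≤ f a x) :
    ∀ (l : List α) (a : Int), a ≤ l.foldl f a := by
  intro l
  induction l with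
  | nil => intro a; simp
  | cons x l ih => intro a; exact le_trans (h a x) (ih (f a x))

theorem pvScore_nonneg (tt : List String) (slug : String) : 0 ≤ pvScore tt slug := by
  unfold pvScore
  apply pv_foldl_le
  intro a t
  apply pv_foldl_le
  intro b st
  split_ifs <;> omega

-- A's max/winners postprocessing of the score table equals B's sort-then-look-at-the-top-two
theorem pv_final (g : String → Int) (hg : ∀ s, 0 ≤ g s) (dd : List String) (hdd : dd ≠ []) (hnd : dd.Nodup) :
    (match PySem.List.max? ((dd.map (fun s => (s, g s))).map Prod.snd) (fun v => v) with
     | none => none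
     | some best_score =>
       if best_score = 0 then none
       else
         let winners := ((dd.map (fun s => (s, g s))).filter (fun p => p.2 == best_score)).map (fun p => p.1)
         if winners.length = 1 then winners[0]? else none)
    = (match PySem.List.sorted dd g true with
       | [] => none
       | top :: rest =>
         if g top = 0 then none
         else
           match rest with
           | [] => some top
           | second :: _ => if g second = g top then none else some top) := by
  obtain ⟨d0, dtl, rfl⟩ := List.exists_cons_of_ne_nil hdd
  have hvals : (((d0 :: dtl).map (fun s => (s, g s))).map Prod.snd) = g d0 :: dtl.map g := by
    simp [List.map_map, Function.comp]
  rw [hvals, PySem.List.max?_id_cons]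
  have hM : (dtl.map g).foldl max (g d0) = ((d0 :: dtl).map g).foldl max 0 := by
    rw [List.map_cons, List.foldl_cons]
    congr 1
    exact (max_eq_right (hg d0)).symm
  rw [hM]
  set dd := d0 :: dtl with hdddef
  set m := (dd.map g).foldl max 0 with hm
  show (if m = 0 then none
        else
          let winners := ((dd.map (fun s => (s, g s))).filter (fun p => p.2 == m)).map (fun p => p.1)
          if winners.length = 1 then winners[0]? else none) = _
  have hub : ∀ y ∈ dd, g y ≤ m := by
    intro y hy
    exact (PySem.List.le_foldl_max (dd.map g) 0).2 (g y) (List.mem_map_of_mem hy)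
  -- the rank list
  rcases hR : PySem.List.sorted dd g true with _ | ⟨top, rest⟩
  · exact absurd ((PySem.List.sorted_eq_nil_iff dd g true).mp hR) (by simp [hdddef])
  show _ = (if g top = 0 then none
            else match rest with
                 | [] => some top
                 | second :: _ => if g second = g top then none else some top)
  have hperm : (top :: rest).Perm dd := hR ▸ PySem.List.sorted_perm dd g true
  have htopmem : top ∈ dd := hperm.mem_iff.mp (List.mem_cons_self ..)
  have htop_ub : ∀ y ∈ dd, g y ≤ g top := PySem.List.key_head_sorted_rev_ge dd g hR
  have hgt : g top = m := by
    refine le_antisymm (hub top htopmem) ?_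
    rcases PySem.List.foldl_max_mem (dd.map g) 0 with h0 | hmem
    · rw [← hm] at h0; rw [h0]; exact hg top
    · obtain ⟨x, hx, hgx⟩ := List.mem_map.mp hmem
      rw [← hm] at hgx
      rw [← hgx]
      exact htop_ub x hx
  have hwin : ((dd.map (fun s => (s, g s))).filter (fun p => p.2 == m)).map (fun p => p.1)
      = dd.filter (fun s => g s == m) := by
    rw [List.filter_map, List.map_map]
    have h1 : ((fun p : String × Int => p.2 == m) ∘ (fun s => (s, g s))) = (fun s => g s == m) := rfl
    have h2 : ((fun p : String × Int => p.1) ∘ (fun s => (s, g s))) = id := rfl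
    rw [h1, h2, List.map_id]
  have hcntP : dd.countP (fun s => g s == m) = (top :: rest).countP (fun s => g s == m) :=
    (hperm.countP_eq _).symm
  have hflen : (dd.filter (fun s => g s == m)).length = dd.countP (fun s => g s == m) :=
    (List.countP_eq_length_filter).symm
  by_cases h0 : g top = 0
  · rw [if_pos (by rw [← hgt, h0]), if_pos h0]
  · have hm0 : m ≠ 0 := fun h => h0 (hgt.trans h)
    rw [if_neg hm0, if_neg h0]
    simp only [hwin]
    rcases rest with _ | ⟨second, rest'⟩
    · -- unique slug: dd is a permutation of [top], so dd = [top]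
      have hdd1 : dd = [top] := List.perm_singleton.mp hperm.symm
      rw [hdd1]
      have : List.filter (fun s => g s == m) [top] = [top] := by
        simp [hgt]
      rw [this]
      rfl
    · show _ = (if g second = g top then none else some top)
      rcases eq_or_ne (g second) (g top) with hsec | hsec
      · -- tie at the top: at least two elements score m
        rw [if_pos hsec]
        have h2 : 2 ≤ (top :: second :: rest').countP (fun s => g s == m) := by
          rw [List.countP_cons, List.countP_cons]
          have e1 : (fun s => g s == m) top = true := by simp [hgt]
          have e2 : (fun s => g s == m) second = true := by simp [hsec, hgt]
          simp [e1, e2]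
        rw [if_neg (by rw [hflen, hcntP]; omega)]
      · -- strict winner: exactly one element scores m, and it is top
        rw [if_neg hsec]
        have hsle : g second ≤ g top := by
          have := htop_ub second (hperm.mem_iff.mp (by simp))
          exact this
        have hpw : (top :: second :: rest').Pairwise (fun a b => g b ≤ g a) :=
          hR ▸ PySem.List.sorted_pairwise_rev dd g
        have hrest0 : (second :: rest').countP (fun s => g s == m) = 0 := by
          apply List.countP_eq_zero.mpr
          intro y hy
          simp only [beq_iff_eq]
          intro hgy
          rcases List.mem_cons.mp hy with rfl | hy'
          · exact hsec (hgy.trans hgt.symm)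
          · have hy2 : g y ≤ g second := (List.pairwise_cons.mp (List.pairwise_cons.mp hpw).2).1 y hy'
            have : g second = m := le_antisymm (hsle.trans_eq hgt) (hgy ▸ hy2)
            exact hsec (this.trans hgt.symm)
        have hc1 : (top :: second :: rest').countP (fun s => g s == m) = 1 := by
          rw [List.countP_cons, hrest0]
          simp [hgt]
        have hlen1 : (dd.filter (fun s => g s == m)).length = 1 := by
          rw [hflen, hcntP, hc1]
        rw [if_pos hlen1]
        obtain ⟨x, hx⟩ := List.length_eq_one_iff.mp hlen1
        have htopf : top ∈ dd.filter (fun s => g s == m) :=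
          List.mem_filter.mpr ⟨htopmem, by simp [hgt]⟩
        rw [hx] at htopf ⊢
        have : top = x := by simpa using htopf
        rw [← this]
        rfl

-- ===== VERDICT (by name: the statement is the Claim_ definition above) =====
theorem disambiguate_spec : Claim_equal_disambiguate := by
  intro candidates tt _
  show disambiguate candidates tt = disambiguate_alt candidates tt
  unfold disambiguate disambiguate_alt
  by_cases h1 : candidates = []
  · rw [if_pos h1, if_pos h1]
  rw [if_neg h1, if_neg h1]
  by_cases h2 : candidates.length = 1
  · rw [if_pos h2, if_pos h2]
  rw [if_neg h2, if_neg h2]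
  by_cases h3 : tt = []
  · rw [if_pos h3, if_pos h3]
  rw [if_neg h3, if_neg h3]
  have hdd : PySem.List.dedup candidates ≠ [] := by
    obtain ⟨c, cs, rfl⟩ := List.exists_cons_of_ne_nil h1
    intro hE
    have hmem : c ∈ PySem.List.dedup (c :: cs) :=
      (PySem.List.mem_dedup _ _).mpr (List.mem_cons_self ..)
    rw [hE] at hmem
    exact List.not_mem_nil hmem
  have hA : candidates.foldl (fun d slug =>
        let slug_tokens : PySem.Set String := PySem.Set.ofList ((PySem.Str.split? slug "-").getD [])
        let score : Int := tt.foldl (fun acc t => if slug_tokens.contains t then acc + 1 else acc) 0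
        let score : Int := tt.foldl (fun sc t =>
          slug_tokens.foldl (fun sc st =>
            if t ≠ st ∧ (PySem.Str.isIn t st ∨ PySem.Str.isIn st t) ∧ 5 ≤ min (PySem.Str.len t) (PySem.Str.len st)
            then sc + 1 else sc) sc) score
        d.insert slug score) PySem.Dict.empty
      = PySem.Dict.mk ((PySem.List.dedup candidates).map (fun s => (s, pvScore tt s))) := by
    apply pv_dict_fold' (pvScore tt)
    intro d slug
    exact congrArg (d.insert slug)
      (pv_score_eq tt (PySem.Set.ofList ((PySem.Str.split? slug "-").getD []))
        (PySem.Set.nodup_ofList _))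
  rw [hA]
  exact pv_final (pvScore tt) (pvScore_nonneg tt) (PySem.List.dedup candidates) hdd
    (PySem.List.nodup_dedup candidates)
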